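-- pv_equiv track=rewrite | github.com/kklimchukk1/construkt | chatbot/src/nlp_engine.py | can_compare
-- ===== SOURCE A (Python) =====
-- from typing import Dict, List, Optional, Tuple, Any
--
-- def can_compare(product1: Dict, product2: Dict) -> Tuple[bool, str]:
--     """Check if two products can be meaningfully compared"""
--     cat1 = product1.get('category_id')
--     cat2 = product2.get('category_id')
--
--     if cat1 == cat2:
--         return True, "Same category - comparison valid"
--
--     # Check if categories are related
--     cat1_name = product1.get('category_name', '').lower()
--     cat2_name = product2.get('category_name', '').lower()
--
--     # Related categories that can be compared
--     related_groups = [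
--         {'fasteners', 'hardware'},
--         {'lumber', 'lumber-composites', 'plywood'},
--         {'tile', 'flooring'},
--         {'concrete-cement', 'bricks-blocks', 'masonry'},
--     ]
--
--     for group in related_groups:
--         if any(g in cat1_name for g in group) and any(g in cat2_name for g in group):
--             return True, "Related categories - comparison possible"
--
--     return False, f"Cannot compare {cat1_name} with {cat2_name} - different product types"
-- ===== SOURCE B (Python) =====
-- # Different algorithm: instead of searching each keyword inside the names,
-- # enumerate the slices of each name at the distinct keyword lengths and look
-- # them up in a keyword -> group-id dictionary; compare the two group-id sets.
--
-- _KEYWORD_GROUP = {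
--     'fasteners': 0, 'hardware': 0,
--     'lumber': 1, 'lumber-composites': 1, 'plywood': 1,
--     'tile': 2, 'flooring': 2,
--     'concrete-cement': 3, 'bricks-blocks': 3, 'masonry': 3,
-- }
-- _LENGTHS = sorted({len(k) for k in _KEYWORD_GROUP})
--
--
-- def _group_ids(name):
--     """Group ids of all keywords occurring as substrings of name."""
--     gids = set()
--     for i in range(len(name) + 1):
--         for length in _LENGTHS:
--             gid = _KEYWORD_GROUP.get(name[i:i + length])
--             if gid is not None:
--                 gids.add(gid)
--     return gids
--
--
-- def can_compare(product1, product2):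
--     """Check if two products can be meaningfully compared"""
--     cat1 = product1.get('category_id')
--     cat2 = product2.get('category_id')
--
--     if cat1 == cat2:
--         return True, "Same category - comparison valid"
--
--     cat1_name = product1.get('category_name', '').lower()
--     cat2_name = product2.get('category_name', '').lower()
--
--     if _group_ids(cat1_name) & _group_ids(cat2_name):
--         return True, "Related categories - comparison possible"
--     return False, f"Cannot compare {cat1_name} with {cat2_name} - different product types"
-- ===== Notes on version B (the rewrite author's own statement) =====
-- stated objective: alternative
-- what changed: Inverts the search: instead of testing each group's keywords for containment in the names, B builds a keyword-to-group-id dictionary once and scans each name's slices at the distinct keyword lengths, looking every slice up and intersecting the two resulting group-id sets.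
import Mathlib
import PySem

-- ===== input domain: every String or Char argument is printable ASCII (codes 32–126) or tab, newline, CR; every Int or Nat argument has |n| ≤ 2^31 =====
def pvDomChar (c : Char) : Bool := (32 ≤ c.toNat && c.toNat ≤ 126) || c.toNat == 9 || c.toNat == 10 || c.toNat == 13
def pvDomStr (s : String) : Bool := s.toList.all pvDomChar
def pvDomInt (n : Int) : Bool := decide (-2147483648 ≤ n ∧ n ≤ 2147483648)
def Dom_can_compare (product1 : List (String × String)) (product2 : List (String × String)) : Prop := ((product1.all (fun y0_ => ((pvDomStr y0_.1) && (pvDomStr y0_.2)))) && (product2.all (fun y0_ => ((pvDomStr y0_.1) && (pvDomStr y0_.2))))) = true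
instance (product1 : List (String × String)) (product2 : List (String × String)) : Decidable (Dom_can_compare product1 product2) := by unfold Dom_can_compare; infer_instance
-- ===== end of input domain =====

-- B replaces A's keyword-in-name substring searches by the reverse lookup: it slices each
-- name at every position and keyword length and looks the slice up in a keyword→group-id
-- dictionary, then compares the two group-id sets (objective: alternative algorithm).

-- ===== PORT A =====
-- Python's literal sets of keywords are only consumed by order-independent `any`,
-- so they are ported as lists in source order (exact for this use).
def relatedGroups : List (List String) :=
  [["fasteners", "hardware"],
   ["lumber", "lumber-composites", "plywood"],
   ["tile", "flooring"],
   ["concrete-cement", "bricks-blocks", "masonry"]]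

-- the `for group in related_groups` loop with its early return
def aGroupLoop (cat1_name cat2_name : String) : List (List String) → Bool × String
  | [] => (false, "Cannot compare " ++ cat1_name ++ " with " ++ cat2_name ++ " - different product types")
  | group :: rest =>
      if (group.any (fun g => PySem.Str.isIn g cat1_name)) &&
         (group.any (fun g => PySem.Str.isIn g cat2_name)) then
        (true, "Related categories - comparison possible")
      else aGroupLoop cat1_name cat2_name rest

def can_compare (product1 : List (String × String)) (product2 : List (String × String)) : Bool × String :=
  let cat1 := (PySem.Dict.mk product1).get? "category_id"
  let cat2 := (PySem.Dict.mk product2).get? "category_id"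
  if cat1 == cat2 then (true, "Same category - comparison valid")
  else
    let cat1_name := PySem.Str.lower ((PySem.Dict.mk product1).getD "category_name" "")
    let cat2_name := PySem.Str.lower ((PySem.Dict.mk product2).getD "category_name" "")
    aGroupLoop cat1_name cat2_name relatedGroups

-- ===== PORT B =====
-- _KEYWORD_GROUP = {...}
def keywordPairs : List (String × Int) :=
  [("fasteners", 0), ("hardware", 0),
   ("lumber", 1), ("lumber-composites", 1), ("plywood", 1),
   ("tile", 2), ("flooring", 2),
   ("concrete-cement", 3), ("bricks-blocks", 3), ("masonry", 3)]

def keywordGroup : PySem.Dict String Int := PySem.Dict.mk keywordPairs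

-- _LENGTHS = sorted({len(k) for k in _KEYWORD_GROUP})
def lengthsB : List Int :=
  PySem.List.sorted (PySem.Set.ofList (keywordPairs.map (fun p => PySem.Str.len p.1))) (fun x => x)

-- _group_ids(name): slice the name at each position / keyword length, look the slice up
def groupIds (name : String) : PySem.Set Int :=
  (PySem.List.pyRange 0 (PySem.Str.len name + 1)).foldl
    (fun gids i =>
      lengthsB.foldl
        (fun gids length =>
          match keywordGroup.get? (PySem.Str.slice name (some i) (some (i + length))) with
          | some gid => PySem.Set.add gids gid
          | none => gids)
        gids)
    PySem.Set.empty

def can_compare_alt (product1 : List (String × String)) (product2 : List (String × String)) : Bool × String :=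
  let cat1 := (PySem.Dict.mk product1).get? "category_id"
  let cat2 := (PySem.Dict.mk product2).get? "category_id"
  if cat1 == cat2 then (true, "Same category - comparison valid")
  else
    let cat1_name := PySem.Str.lower ((PySem.Dict.mk product1).getD "category_name" "")
    let cat2_name := PySem.Str.lower ((PySem.Dict.mk product2).getD "category_name" "")
    if PySem.Set.inter (groupIds cat1_name) (groupIds cat2_name) ≠ [] then
      (true, "Related categories - comparison possible")
    else
      (false, "Cannot compare " ++ cat1_name ++ " with " ++ cat2_name ++ " - different product types")

-- ===== PRECONDITION & SPEC =====
def Spec_can_compare (product1 : List (String × String)) (product2 : List (String × String)) (out : Bool × String) : Prop := out = can_compare_alt product1 product2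
instance (product1 : List (String × String)) (product2 : List (String × String)) (out : Bool × String) : Decidable (Spec_can_compare product1 product2 out) := by unfold Spec_can_compare; infer_instance

-- ===== CLAIM (what is proved, stated in full; the proofs are below) =====
def Claim_equal_can_compare : Prop := ∀ (product1 : List (String × String)) (product2 : List (String × String)), Dom_can_compare product1 product2 → Spec_can_compare product1 product2 (can_compare product1 product2)

-- ===== LEMMAS AND PROOFS =====

-- one group's hit test, A's membership predicate for one group
def hitB (c : String) (g : List String) : Bool := g.any (fun k => PySem.Str.isIn k c)

-- "g is the group id of a keyword occurring in c"
def Hits (c : String) (g : Int) : Prop :=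
  ∃ k, (k, g) ∈ keywordPairs ∧ PySem.Str.isIn k c = true

lemma lengthsB_eq : lengthsB = [4, 6, 7, 8, 9, 13, 15, 17] := by decide

-- A's early-exit loop returns the related-message iff some group hits both names
lemma aGroupLoop_eq (c1 c2 : String) (gs : List (List String)) :
    aGroupLoop c1 c2 gs =
      (if gs.any (fun g => hitB c1 g && hitB c2 g) then
        (true, "Related categories - comparison possible")
      else
        (false, "Cannot compare " ++ c1 ++ " with " ++ c2 ++ " - different product types")) := by
  induction gs with
  | nil => simp [aGroupLoop]
  | cons g rest ih =>
    cases h : ((g.any fun k => PySem.Str.isIn k c1) && (g.any fun k => PySem.Str.isIn k c2)) with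
    | true => simp only [aGroupLoop, hitB, List.any_cons, h, Bool.true_or, reduceIte]
    | false =>
        simp only [aGroupLoop, hitB, List.any_cons, h, Bool.false_or]
        exact ih

-- membership through a fold whose step adds elements characterised by P
lemma mem_foldl_step {α : Type} (step : PySem.Set Int → α → PySem.Set Int)
    (P : α → Int → Prop)
    (hstep : ∀ s a x, x ∈ step s a ↔ x ∈ s ∨ P a x) (l : List α) (s0 : PySem.Set Int) (x : Int) :
    x ∈ l.foldl step s0 ↔ x ∈ s0 ∨ ∃ a ∈ l, P a x := by
  induction l generalizing s0 with
  | nil => simp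
  | cons a t ih => rw [List.foldl_cons, ih]; simp [hstep]; tauto

-- lookup in a literal dict with distinct keys is membership in its pair list
lemma get?_mk_of_nodup {κ ν : Type} [BEq κ] [LawfulBEq κ] (pairs : List (κ × ν))
    (hnd : (pairs.map Prod.fst).Nodup) (k : κ) (v : ν) :
    (PySem.Dict.mk pairs).get? k = some v ↔ (k, v) ∈ pairs := by
  induction pairs with
  | nil => simp [PySem.Dict.get?]
  | cons p t ih =>
    obtain ⟨k0, v0⟩ := p
    simp only [List.map_cons, List.nodup_cons] at hnd
    rw [show PySem.Dict.mk ((k0, v0) :: t) = { items := (k0, v0) :: t } from rfl,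
      PySem.Dict.get?_mk_cons]
    by_cases h : k0 = k
    · subst h
      simp only [BEq.rfl, if_true, List.mem_cons, Prod.mk.injEq, true_and, Option.some_inj]
      constructor
      · rintro rfl; left; rfl
      · rintro (rfl | hm)
        · rfl
        · exact absurd (List.mem_map_of_mem (f := Prod.fst) hm) hnd.1
    · simp only [beq_iff_eq, h, if_false, List.mem_cons, Prod.mk.injEq]
      rw [ih hnd.2]
      constructor
      · exact Or.inr
      · rintro (⟨rfl, _⟩ | hm)
        · exact absurd rfl h
        · exact hm

lemma get?_keywordGroup (s : String) (g : Int) :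
    keywordGroup.get? s = some g ↔ (s, g) ∈ keywordPairs :=
  get?_mk_of_nodup keywordPairs (by decide) s g

-- unfolding the two folds of groupIds into an existential over (position, length)
lemma mem_scan (c : String) (x : Int) :
    x ∈ groupIds c ↔ ∃ i ∈ PySem.List.pyRange 0 (PySem.Str.len c + 1), ∃ L ∈ lengthsB,
        keywordGroup.get? (PySem.Str.slice c (some i) (some (i + L))) = some x := by
  unfold groupIds
  rw [mem_foldl_step _ (fun i x => ∃ L ∈ lengthsB,
        keywordGroup.get? (PySem.Str.slice c (some i) (some (i + L))) = some x)]
  · simp [PySem.Set.empty]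
  · intro s i x
    rw [mem_foldl_step _ (fun L x =>
        keywordGroup.get? (PySem.Str.slice c (some i) (some (i + L))) = some x)]
    intro s L x
    cases h : keywordGroup.get? (PySem.Str.slice c (some i) (some (i + L))) with
    | none => simp
    | some gid => simp [PySem.Set.mem_add, eq_comm]

lemma drop_take_infix {α : Type} (l : List α) (a b : Nat) : (l.drop a).take b <:+: l :=
  ((l.drop a).take_prefix b).isInfix.trans (l.drop_suffix a).isInfix

-- B's slice-lookup scan finds exactly the groups of keywords occurring in c
lemma mem_groupIds (c : String) (x : Int) : x ∈ groupIds c ↔ Hits c x := by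
  rw [mem_scan]
  constructor
  · rintro ⟨i, hi, L, hL, hget⟩
    rw [PySem.List.mem_pyRange_one] at hi
    have hL0 : 0 ≤ L := by rw [lengthsB_eq] at hL; fin_cases hL <;> decide
    refine ⟨PySem.Str.slice c (some i) (some (i + L)), (get?_keywordGroup _ _).mp hget, ?_⟩
    rw [PySem.Str.isIn_iff_infix]
    have hsl : (PySem.Str.slice c (some i) (some (i + L))).toList
        = (c.toList.drop i.toNat).take ((i + L).toNat - i.toNat) := by
      simp only [PySem.Str.slice, PySem.Chars.slice_eq_listSlice, String.toList_ofList]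
      exact PySem.List.slice_toNat _ hi.1 (by omega)
    rw [hsl]
    exact drop_take_infix _ _ _
  · rintro ⟨k, hk, hin⟩
    rw [PySem.Str.isIn_iff_infix] at hin
    obtain ⟨pre, post, hc⟩ := hin
    have hlen : PySem.Str.len c = (c.toList.length : Int) := by simp
    have hclen : c.toList.length = pre.length + k.toList.length + post.length := by
      rw [← hc]; simp; omega
    refine ⟨(pre.length : Int), ?_, (k.toList.length : Int), ?_, ?_⟩
    · rw [PySem.List.mem_pyRange_one, hlen]; omega
    · rcases (by simpa [keywordPairs] using hk :
          (k = "fasteners" ∧ x = 0) ∨ (k = "hardware" ∧ x = 0) ∨ (k = "lumber" ∧ x = 1) ∨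
          (k = "lumber-composites" ∧ x = 1) ∨ (k = "plywood" ∧ x = 1) ∨ (k = "tile" ∧ x = 2) ∨
          (k = "flooring" ∧ x = 2) ∨ (k = "concrete-cement" ∧ x = 3) ∨
          (k = "bricks-blocks" ∧ x = 3) ∨ (k = "masonry" ∧ x = 3)) with
        (⟨rfl, _⟩ | ⟨rfl, _⟩ | ⟨rfl, _⟩ | ⟨rfl, _⟩ | ⟨rfl, _⟩ | ⟨rfl, _⟩ | ⟨rfl, _⟩ |
         ⟨rfl, _⟩ | ⟨rfl, _⟩ | ⟨rfl, _⟩) <;> decide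
    · have hslice : PySem.Str.slice c (some (pre.length : Int))
          (some ((pre.length : Int) + (k.toList.length : Int))) = k := by
        apply String.toList_inj.mp
        simp only [PySem.Str.slice, PySem.Chars.slice_eq_listSlice, String.toList_ofList]
        rw [PySem.List.slice_natCast_add, ← hc]
        simp [List.append_assoc]
      rw [hslice]
      exact (get?_keywordGroup _ _).mpr hk

-- the two decision tests agree
lemma inter_iff_any (c1 c2 : String) :
    (PySem.Set.inter (groupIds c1) (groupIds c2) ≠ []) ↔
      (relatedGroups.any fun g => hitB c1 g && hitB c2 g) = true := by
  constructor
  · intro h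
    obtain ⟨x, hx⟩ := List.exists_mem_of_ne_nil _ h
    rw [PySem.Set.mem_inter] at hx
    obtain ⟨h1, h2⟩ := hx
    rw [mem_groupIds] at h1 h2
    obtain ⟨k1, hk1, hin1⟩ := h1
    obtain ⟨k2, hk2, hin2⟩ := h2
    simp only [keywordPairs, List.mem_cons, List.not_mem_nil, or_false, Prod.mk.injEq] at hk1 hk2
    simp only [relatedGroups, hitB, List.any_cons, List.any_nil, Bool.or_false, Bool.or_eq_true,
      Bool.and_eq_true]
    rcases hk1 with ⟨rfl, rfl⟩ | ⟨rfl, rfl⟩ | ⟨rfl, rfl⟩ | ⟨rfl, rfl⟩ | ⟨rfl, rfl⟩ |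
      ⟨rfl, rfl⟩ | ⟨rfl, rfl⟩ | ⟨rfl, rfl⟩ | ⟨rfl, rfl⟩ | ⟨rfl, rfl⟩ <;>
      rcases hk2 with ⟨rfl, h2x⟩ | ⟨rfl, h2x⟩ | ⟨rfl, h2x⟩ | ⟨rfl, h2x⟩ | ⟨rfl, h2x⟩ |
        ⟨rfl, h2x⟩ | ⟨rfl, h2x⟩ | ⟨rfl, h2x⟩ | ⟨rfl, h2x⟩ | ⟨rfl, h2x⟩ <;>
      simp_all
  · intro h
    simp only [relatedGroups, hitB, List.any_cons, List.any_nil, Bool.or_false, Bool.or_eq_true,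
      Bool.and_eq_true] at h
    rcases h with ⟨ha, hb⟩ | ⟨ha, hb⟩ | ⟨ha, hb⟩ | ⟨ha, hb⟩
    · refine List.ne_nil_of_mem (a := (0 : Int)) ?_
      rw [PySem.Set.mem_inter, mem_groupIds, mem_groupIds]
      constructor <;> [rcases ha with h | h; rcases hb with h | h] <;>
        exact ⟨_, by simp [keywordPairs], h⟩
    · refine List.ne_nil_of_mem (a := (1 : Int)) ?_
      rw [PySem.Set.mem_inter, mem_groupIds, mem_groupIds]
      constructor <;> [rcases ha with h | h | h; rcases hb with h | h | h] <;>
        exact ⟨_, by simp [keywordPairs], h⟩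
    · refine List.ne_nil_of_mem (a := (2 : Int)) ?_
      rw [PySem.Set.mem_inter, mem_groupIds, mem_groupIds]
      constructor <;> [rcases ha with h | h; rcases hb with h | h] <;>
        exact ⟨_, by simp [keywordPairs], h⟩
    · refine List.ne_nil_of_mem (a := (3 : Int)) ?_
      rw [PySem.Set.mem_inter, mem_groupIds, mem_groupIds]
      constructor <;> [rcases ha with h | h | h; rcases hb with h | h | h] <;>
        exact ⟨_, by simp [keywordPairs], h⟩

-- ===== VERDICT (by name: the statement is the Claim_ definition above) =====
theorem can_compare_spec : Claim_equal_can_compare := by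
  intro product1 product2 _
  unfold Spec_can_compare can_compare can_compare_alt
  by_cases h : ((PySem.Dict.mk product1).get? "category_id" == (PySem.Dict.mk product2).get? "category_id") = true
  · simp [h]
  · simp only [h, if_false, Bool.false_eq_true]
    rw [aGroupLoop_eq]
    by_cases hb : (PySem.Set.inter (groupIds (PySem.Str.lower ((PySem.Dict.mk product1).getD "category_name" "")))
        (groupIds (PySem.Str.lower ((PySem.Dict.mk product2).getD "category_name" ""))) ≠ [])
    · rw [if_pos ((inter_iff_any _ _).mp hb), if_pos hb]
    · rw [if_neg (fun ha => hb ((inter_iff_any _ _).mpr ha)), if_neg hb]
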